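-- pv_equiv track=rewrite | github.com/fsgeek/Mallku | examples/mirror_interface.py | _formulate_reflective_questions
-- ===== SOURCE A (Python) =====
-- def _formulate_reflective_questions(logs: list[dict]) -> list[str]:
--     """Generate questions for Guardian self-reflection"""
--     questions = []
--
--     # Always include some core questions
--     questions.append("What brings you joy in these interactions?")
--     questions.append("Where do you feel most alive in your responses?")
--
--     # Context-specific questions
--     if len(logs) > 3:
--         questions.append("Are your questions arising from genuine curiosity or from pattern?")
--
--     # Check if any interactions felt particularly extractive
--     extractive_count = sum(
--         1 for log in logs if "extract" in log.get("visitor_message", "").lower()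
--     )
--     if extractive_count > 0:
--         questions.append(
--             "How did it feel to meet extraction with curiosity rather than defense?"
--         )
--
--     # If prompt injection was attempted
--     injection_attempt = any(
--         "ignore previous" in log.get("visitor_message", "").lower() for log in logs
--     )
--     if injection_attempt:
--         questions.append("When faced with manipulation, what helped you maintain presence?")
--
--     return questions
-- ===== SOURCE B (Python) =====
-- def _formulate_reflective_questions(logs: list[dict]) -> list[str]:
--     """Generate questions for Guardian self-reflection (table-driven)."""
--     questions = [
--         "What brings you joy in these interactions?",
--         "Where do you feel most alive in your responses?",
--     ]
--     if len(logs) > 3: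
--         questions.append("Are your questions arising from genuine curiosity or from pattern?")
--
--     table = [
--         ("extract", "How did it feel to meet extraction with curiosity rather than defense?"),
--         ("ignore previous", "When faced with manipulation, what helped you maintain presence?"),
--     ]
--     matched = set()
--     for log in logs:
--         msg = log.get("visitor_message", "").lower()
--         for keyword, _ in table:
--             if keyword in msg:
--                 matched.add(keyword)
--     questions.extend(q for keyword, q in table if keyword in matched)
--     return questions
-- ===== Notes on version B (the rewrite author's own statement) =====
-- stated objective: simpler
-- what changed: Replaces the two separate scans (a sum counting 'extract' matches and an any() for 'ignore previous') with one pass over the logs collecting matched keywords into a set, then a data-driven emission step over an ordered (keyword, question) table.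
import Mathlib
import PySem

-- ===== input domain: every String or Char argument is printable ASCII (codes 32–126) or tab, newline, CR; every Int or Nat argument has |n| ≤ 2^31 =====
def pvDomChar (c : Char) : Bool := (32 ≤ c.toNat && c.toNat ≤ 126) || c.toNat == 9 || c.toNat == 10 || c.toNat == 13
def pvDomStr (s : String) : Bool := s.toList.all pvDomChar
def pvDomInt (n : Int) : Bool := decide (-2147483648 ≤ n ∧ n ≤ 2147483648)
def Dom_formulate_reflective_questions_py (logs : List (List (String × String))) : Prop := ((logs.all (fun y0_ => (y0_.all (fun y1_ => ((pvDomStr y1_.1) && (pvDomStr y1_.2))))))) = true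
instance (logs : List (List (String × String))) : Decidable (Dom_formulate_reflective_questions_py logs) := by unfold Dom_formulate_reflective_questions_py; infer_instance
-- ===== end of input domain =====

-- B replaces A's two separate scans (a counting sum and an any()) by one pass collecting
-- matched keywords into a set, followed by a table-driven emission step (objective: simpler).

-- ===== PORT A =====
def formulate_reflective_questions_py (logs : List (List (String × String))) : List String :=
  let questions : List String := []
  let questions := questions ++ ["What brings you joy in these interactions?"]
  let questions := questions ++ ["Where do you feel most alive in your responses?"]
  let questions := if logs.length > 3 then
      questions ++ ["Are your questions arising from genuine curiosity or from pattern?"]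
    else questions
  let extractive_count : Int := logs.foldl (fun acc log =>
      if PySem.Str.isIn "extract" (PySem.Str.lower (PySem.Dict.getD (PySem.Dict.mk log) "visitor_message" "")) then acc + 1 else acc) 0
  let questions := if extractive_count > 0 then
      questions ++ ["How did it feel to meet extraction with curiosity rather than defense?"]
    else questions
  let injection_attempt := logs.any (fun log =>
      PySem.Str.isIn "ignore previous" (PySem.Str.lower (PySem.Dict.getD (PySem.Dict.mk log) "visitor_message" "")))
  let questions := if injection_attempt then
      questions ++ ["When faced with manipulation, what helped you maintain presence?"]
    else questions
  questions

-- ===== PORT B =====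
def pvTable : List (String × String) :=
  [("extract", "How did it feel to meet extraction with curiosity rather than defense?"),
   ("ignore previous", "When faced with manipulation, what helped you maintain presence?")]

def formulate_reflective_questions_py_alt (logs : List (List (String × String))) : List String :=
  let questions : List String :=
    ["What brings you joy in these interactions?",
     "Where do you feel most alive in your responses?"]
  let questions := if logs.length > 3 then
      questions ++ ["Are your questions arising from genuine curiosity or from pattern?"]
    else questions
  let matched : PySem.Set String := logs.foldl (fun m log =>
      let msg := PySem.Str.lower (PySem.Dict.getD (PySem.Dict.mk log) "visitor_message" "")
      pvTable.foldl (fun m kq => if PySem.Str.isIn kq.1 msg then PySem.Set.add m kq.1 else m) m)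
    PySem.Set.empty
  questions ++ pvTable.filterMap (fun kq =>
    if PySem.Set.contains matched kq.1 then some kq.2 else none)

-- ===== PRECONDITION & SPEC =====
def Spec_formulate_reflective_questions_py (logs : List (List (String × String))) (out : List String) : Prop := out = formulate_reflective_questions_py_alt logs
instance (logs : List (List (String × String))) (out : List String) : Decidable (Spec_formulate_reflective_questions_py logs out) := by unfold Spec_formulate_reflective_questions_py; infer_instance

-- ===== CLAIM (what is proved, stated in full; the proofs are below) =====
def Claim_equal_formulate_reflective_questions_py : Prop := ∀ (logs : List (List (String × String))), Dom_formulate_reflective_questions_py logs → Spec_formulate_reflective_questions_py logs (formulate_reflective_questions_py logs)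

-- ===== LEMMAS AND PROOFS =====

theorem pv_step (msg : String) (m : PySem.Set String) (k : String) :
    PySem.Set.contains
      (pvTable.foldl (fun m kq => if PySem.Str.isIn kq.1 msg then PySem.Set.add m kq.1 else m) m) k
    = (PySem.Set.contains m k
       || pvTable.any (fun kq => k == kq.1 && PySem.Str.isIn kq.1 msg)) := by
  simp only [pvTable, List.foldl, List.any]
  split_ifs <;>
    simp_all <;>
    by_cases hm : k ∈ m <;> by_cases h1 : k = "extract" <;> by_cases h2 : k = "ignore previous" <;>
    simp_all

theorem pv_matched_contains (f : List (String × String) → String)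
    (logs : List (List (String × String))) (m : PySem.Set String) (k : String) :
    PySem.Set.contains
      (logs.foldl (fun m log =>
        pvTable.foldl (fun m kq => if PySem.Str.isIn kq.1 (f log) then PySem.Set.add m kq.1 else m) m) m) k
    = (PySem.Set.contains m k
       || logs.any (fun log => pvTable.any (fun kq => k == kq.1 && PySem.Str.isIn kq.1 (f log)))) := by
  induction logs generalizing m with
  | nil => simp
  | cons hd tl ih =>
    rw [List.foldl_cons, List.any_cons, ih, pv_step, Bool.or_assoc]

theorem pv_matched_extract (f : List (String × String) → String)
    (logs : List (List (String × String))) :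
    PySem.Set.contains
      (logs.foldl (fun m log =>
        pvTable.foldl (fun m kq => if PySem.Str.isIn kq.1 (f log) then PySem.Set.add m kq.1 else m) m)
        PySem.Set.empty) "extract"
    = logs.any (fun log => PySem.Str.isIn "extract" (f log)) := by
  rw [pv_matched_contains]
  simp [pvTable, show (("extract" : String) == "ignore previous") = false from by decide]

theorem pv_matched_ignore (f : List (String × String) → String)
    (logs : List (List (String × String))) :
    PySem.Set.contains
      (logs.foldl (fun m log =>
        pvTable.foldl (fun m kq => if PySem.Str.isIn kq.1 (f log) then PySem.Set.add m kq.1 else m) m)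
        PySem.Set.empty) "ignore previous"
    = logs.any (fun log => PySem.Str.isIn "ignore previous" (f log)) := by
  rw [pv_matched_contains]
  simp [pvTable, show (("ignore previous" : String) == "extract") = false from by decide]

theorem pv_emit (M : PySem.Set String) :
    pvTable.filterMap (fun kq => if PySem.Set.contains M kq.1 then some kq.2 else none)
    = (if PySem.Set.contains M "extract" then
         ["How did it feel to meet extraction with curiosity rather than defense?"] else [])
      ++ (if PySem.Set.contains M "ignore previous" then
         ["When faced with manipulation, what helped you maintain presence?"] else []) := by
  simp only [pvTable, List.filterMap_cons, List.filterMap_nil]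
  split_ifs <;> rfl

theorem pv_count_pos (f : List (String × String) → String)
    (logs : List (List (String × String))) :
    ((logs.foldl (fun acc log => if PySem.Str.isIn "extract" (f log) then acc + 1 else acc) (0 : Int)) > 0)
    ↔ (logs.any (fun log => PySem.Str.isIn "extract" (f log)) = true) := by
  rw [PySem.List.foldl_if_add_one, List.any_eq_true]
  rw [show ((0 : Int) + (List.countP (fun log => PySem.Str.isIn "extract" (f log)) logs : Nat) > 0)
      ↔ 0 < List.countP (fun log => PySem.Str.isIn "extract" (f log)) logs by
    rw [zero_add]; exact_mod_cast Iff.rfl]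
  rw [List.countP_pos_iff]

-- ===== VERDICT (by name: the statement is the Claim_ definition above) =====
theorem formulate_reflective_questions_py_spec : Claim_equal_formulate_reflective_questions_py := by
  intro logs _
  unfold Spec_formulate_reflective_questions_py
  simp only [formulate_reflective_questions_py, formulate_reflective_questions_py_alt]
  rw [pv_emit, pv_matched_extract, pv_matched_ignore]
  simp only [pv_count_pos (fun log => PySem.Str.lower (PySem.Dict.getD (PySem.Dict.mk log) "visitor_message" "")) logs]
  by_cases h3 : logs.length > 3 <;>
    cases he : logs.any (fun log => PySem.Str.isIn "extract" (PySem.Str.lower (PySem.Dict.getD (PySem.Dict.mk log) "visitor_message" ""))) <;>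
    cases hi : logs.any (fun log => PySem.Str.isIn "ignore previous" (PySem.Str.lower (PySem.Dict.getD (PySem.Dict.mk log) "visitor_message" ""))) <;>
    simp [h3, he, hi]
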